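-- pv_equiv track=rewrite | github.com/rka97/Maleeka | word_based.py | get_zigzag_keys
-- ===== SOURCE A (Python) =====
-- def compare(xy):
--     x, y = xy
--     return (x + y, -y if (x + y) % 2 else y)
--
-- def zigzag(n):
--     '''zigzag rows'''
--     xs = range(n)
--     return {index: n for n, index in enumerate(sorted(
--         ((x, y) for x in xs for y in xs),
--         key=compare
--     ))}
--
-- zigzag_per_n = {}
--
-- def get_zigzag_keys(dim_size):
--     if dim_size in zigzag_per_n:
--         return zigzag_per_n[dim_size]
--     else:
--         zigzag_keys_rows = []
--         zigzag_keys_columns = []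
--         zigzag_for_n = zigzag(dim_size)
--         for key, value in zigzag_for_n.items():
--             zigzag_keys_rows.append(key[0])
--             zigzag_keys_columns.append(key[1])
--         zigzag_keys = [zigzag_keys_rows, zigzag_keys_columns]
--         zigzag_per_n[dim_size] = zigzag_keys
--         return zigzag_keys
-- ===== SOURCE B (Python) =====
-- def get_zigzag_keys(dim_size):
--     # Direct anti-diagonal generation: diagonal s holds cells with x + y == s,
--     # visited in ascending y for even s and descending y for odd s (no sort).
--     rows = []
--     cols = []
--     for s in range(max(0, 2 * dim_size - 1)):
--         lo = max(0, s - dim_size + 1)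
--         hi = min(s, dim_size - 1)
--         ys = range(lo, hi + 1)
--         if s % 2:
--             ys = reversed(ys)
--         for y in ys:
--             rows.append(s - y)
--             cols.append(y)
--     return [rows, cols]
-- ===== Notes on version B (the rewrite author's own statement) =====
-- stated objective: faster
-- what changed: B emits the n x n coordinates anti-diagonal by anti-diagonal, alternating the y-direction with the diagonal's parity, instead of sorting all n^2 coordinates with a zigzag key and round-tripping them through a dict (and B keeps no memo cache).
import Mathlib
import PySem

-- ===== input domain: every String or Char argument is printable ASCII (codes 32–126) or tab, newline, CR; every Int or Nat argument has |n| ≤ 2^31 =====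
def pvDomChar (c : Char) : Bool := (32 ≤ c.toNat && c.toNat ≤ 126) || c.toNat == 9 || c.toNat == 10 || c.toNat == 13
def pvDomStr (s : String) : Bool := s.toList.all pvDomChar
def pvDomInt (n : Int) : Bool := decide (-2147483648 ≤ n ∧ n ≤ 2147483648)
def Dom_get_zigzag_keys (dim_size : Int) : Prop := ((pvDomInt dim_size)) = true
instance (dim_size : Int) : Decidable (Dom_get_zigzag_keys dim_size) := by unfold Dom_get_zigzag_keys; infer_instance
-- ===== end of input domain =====

-- B generates the anti-diagonals of the grid directly (alternating direction by the diagonal's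
-- parity) instead of sorting all n*n coordinates with a zigzag key, and A additionally memoizes
-- its result in a module-level dict (a side effect B does not perform; the equivalence proved
-- here is about the RETURN value, which the cache never changes).

-- ===== PORT A =====
-- helper 'compare(xy)' of A (named zz_compare to avoid clashing with Lean's Ord.compare)
def zz_compare (xy : Int × Int) : Int × Int :=
  (xy.1 + xy.2, if PySem.Int.mod (xy.1 + xy.2) 2 ≠ 0 then -xy.2 else xy.2)

-- helper 'zigzag(n)': the dict {coordinate : position} built from the sorted product
def zigzag (n : Int) : PySem.Dict (Int × Int) Int :=
  let xs := PySem.List.pyRange 0 n 1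
  let srt := PySem.List.sorted2 (xs.flatMap (fun x => xs.map (fun y => (x, y))))
      (fun p => (zz_compare p).1) (fun p => (zz_compare p).2)
  (PySem.List.enumerate srt 0).foldl (fun d ni => d.insert ni.2 ni.1) PySem.Dict.empty

def get_zigzag_keys (dim_size : Int) : List (List Int) :=
  -- the module-level memo cache is omitted: it returns the very value the else-branch computes
  let rc := (zigzag dim_size).items.foldl
      (fun (rc : List Int × List Int) kv => (rc.1 ++ [kv.1.1], rc.2 ++ [kv.1.2])) (([], []) : List Int × List Int)
  [rc.1, rc.2]

-- ===== PORT B =====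
def get_zigzag_keys_alt (dim_size : Int) : List (List Int) :=
  let rc := (PySem.List.pyRange 0 (max 0 (2 * dim_size - 1)) 1).foldl (fun rc s =>
      let lo := max 0 (s - dim_size + 1)
      let hi := min s (dim_size - 1)
      let asc := PySem.List.pyRange lo (hi + 1) 1
      let ys := if PySem.Int.mod s 2 ≠ 0 then asc.reverse else asc
      ys.foldl (fun (rc : List Int × List Int) y => (rc.1 ++ [s - y], rc.2 ++ [y])) rc)
    (([], []) : List Int × List Int)
  [rc.1, rc.2]

-- ===== PRECONDITION & SPEC =====
def Spec_get_zigzag_keys (dim_size : Int) (out : List (List Int)) : Prop := out = get_zigzag_keys_alt dim_size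
instance (dim_size : Int) (out : List (List Int)) : Decidable (Spec_get_zigzag_keys dim_size out) := by unfold Spec_get_zigzag_keys; infer_instance

-- ===== CLAIM (what is proved, stated in full; the proofs are below) =====
def Claim_equal_get_zigzag_keys : Prop := ∀ (dim_size : Int), Dom_get_zigzag_keys dim_size → Spec_get_zigzag_keys dim_size (get_zigzag_keys dim_size)

-- ===== LEMMAS AND PROOFS =====

-- the row-major product list A sorts
def zzProd (n : Int) : List (Int × Int) :=
  (PySem.List.pyRange 0 n 1).flatMap (fun x => (PySem.List.pyRange 0 n 1).map (fun y => (x, y)))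

-- B's y-values on anti-diagonal s
def zzYs (n s : Int) : List Int :=
  if PySem.Int.mod s 2 ≠ 0 then (PySem.List.pyRange (max 0 (s - n + 1)) (min s (n - 1) + 1) 1).reverse
  else PySem.List.pyRange (max 0 (s - n + 1)) (min s (n - 1) + 1) 1

-- B's traversal order as a flat list of coordinates
def zzDiag (n : Int) : List (Int × Int) :=
  (PySem.List.pyRange 0 (max 0 (2 * n - 1)) 1).flatMap (fun s => (zzYs n s).map (fun y => (s - y, y)))

-- A's sort key, as a value of the lexicographic order on pairs (Python compares tuples that way)
def zzKey (p : Int × Int) : Int ×ₗ Int := toLex ((zz_compare p).1, (zz_compare p).2)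

-- sorted(xs, key=lambda x: (k1(x), k2(x))) is a sort by the lexicographic key
lemma sorted2_eq_sorted_lex {α : Type} (xs : List α) (k1 k2 : α → Int) :
    PySem.List.sorted2 xs k1 k2 = PySem.List.sorted xs (fun x => (toLex (k1 x, k2 x) : Int ×ₗ Int)) := by
  rw [PySem.List.sorted_eq_foldl_insertBy]
  show xs.foldl (fun acc x => PySem.List.insertBy
      (fun a b => decide (k1 a < k1 b) || (!decide (k1 b < k1 a) && decide (k2 a < k2 b))) x acc) [] = _
  have h : (fun (a b : α) => decide (k1 a < k1 b) || (!decide (k1 b < k1 a) && decide (k2 a < k2 b)))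
      = fun a b => decide ((toLex (k1 a, k2 a) : Int ×ₗ Int) < toLex (k1 b, k2 b)) := by
    funext a b
    by_cases h1 : k1 a < k1 b <;> by_cases h2 : k1 b < k1 a <;> by_cases h3 : k2 a < k2 b <;>
      simp [h1, h2, h3, Prod.Lex.lt_iff] <;> omega
  rw [h]

lemma mem_zzYs (n s y : Int) : y ∈ zzYs n s ↔ max 0 (s - n + 1) ≤ y ∧ y ≤ min s (n - 1) := by
  unfold zzYs
  split <;> simp only [List.mem_reverse, PySem.List.mem_pyRange_one] <;> omega

lemma mem_zzProd (n : Int) (p : Int × Int) :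
    p ∈ zzProd n ↔ 0 ≤ p.1 ∧ p.1 < n ∧ 0 ≤ p.2 ∧ p.2 < n := by
  obtain ⟨x, y⟩ := p
  simp [zzProd, List.mem_flatMap, PySem.List.mem_pyRange_one]
  omega

lemma nodup_zzProd (n : Int) : (zzProd n).Nodup := by
  have h : zzProd n = (PySem.List.pyRange 0 n 1) ×ˢ (PySem.List.pyRange 0 n 1) := rfl
  rw [h]
  exact List.Nodup.product (PySem.List.nodup_pyRange_one 0 n) (PySem.List.nodup_pyRange_one 0 n)

lemma mem_zzDiag (n : Int) (p : Int × Int) :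
    p ∈ zzDiag n ↔ 0 ≤ p.1 ∧ p.1 < n ∧ 0 ≤ p.2 ∧ p.2 < n := by
  obtain ⟨x, y⟩ := p
  simp only [zzDiag, List.mem_flatMap, List.mem_map, PySem.List.mem_pyRange_one, Prod.mk.injEq]
  constructor
  · rintro ⟨s, hs, y', hy', hx, hy⟩
    rw [mem_zzYs] at hy'
    omega
  · rintro ⟨hx0, hxn, hy0, hyn⟩
    exact ⟨x + y, by omega, y, by rw [mem_zzYs]; omega, by omega, rfl⟩

lemma zzKey_diag (s y : Int) :
    zzKey (s - y, y) = toLex (s, if PySem.Int.mod s 2 ≠ 0 then -y else y) := by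
  simp [zzKey, zz_compare]

-- B's traversal is strictly increasing in A's sort key
lemma pairwise_zzDiag (n : Int) : (zzDiag n).Pairwise (fun a b => zzKey a < zzKey b) := by
  unfold zzDiag
  rw [List.pairwise_flatMap]
  constructor
  · intro s _
    rw [List.pairwise_map]
    unfold zzYs
    split
    case isTrue hodd =>
      rw [List.pairwise_reverse]
      refine List.Pairwise.imp ?_ (PySem.List.pairwise_lt_pyRange_one _ _)
      intro y y' h
      rw [zzKey_diag, zzKey_diag, if_pos hodd, if_pos hodd, Prod.Lex.lt_iff]
      right
      simp only [ofLex_toLex]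
      exact ⟨by trivial, by omega⟩
    case isFalse heven =>
      refine List.Pairwise.imp ?_ (PySem.List.pairwise_lt_pyRange_one _ _)
      intro y y' h
      rw [zzKey_diag, zzKey_diag, if_neg heven, if_neg heven, Prod.Lex.lt_iff]
      right
      simp only [ofLex_toLex]
      exact ⟨by trivial, h⟩
  · refine List.Pairwise.imp ?_ (PySem.List.pairwise_lt_pyRange_one _ _)
    intro s s' hss p hp q hq
    simp only [List.mem_map] at hp hq
    obtain ⟨y, -, rfl⟩ := hp
    obtain ⟨y', -, rfl⟩ := hq
    rw [zzKey_diag, zzKey_diag, Prod.Lex.lt_iff]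
    left
    simpa using hss

lemma nodup_zzDiag (n : Int) : (zzDiag n).Nodup := by
  refine List.Pairwise.imp ?_ (pairwise_zzDiag n)
  intro a b h heq
  exact absurd h (by simp [heq])

lemma perm_zzDiag_zzProd (n : Int) : (zzDiag n).Perm (zzProd n) :=
  (List.perm_ext_iff_of_nodup (nodup_zzDiag n) (nodup_zzProd n)).2
    (fun p => by rw [mem_zzDiag, mem_zzProd])

-- the heart of the equivalence: A's sorted product IS B's diagonal traversal
lemma sorted_prod_eq_diag (n : Int) :
    PySem.List.sorted2 (zzProd n) (fun p => (zz_compare p).1) (fun p => (zz_compare p).2) = zzDiag n := by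
  rw [sorted2_eq_sorted_lex]
  exact PySem.List.sorted_eq_of_perm_of_pairwise_lt _ _ zzKey (perm_zzDiag_zzProd n) (pairwise_zzDiag n)

lemma A_shape (n : Int) :
    get_zigzag_keys n =
      [(PySem.List.sorted2 (zzProd n) (fun p => (zz_compare p).1) (fun p => (zz_compare p).2)).map (·.1),
       (PySem.List.sorted2 (zzProd n) (fun p => (zz_compare p).1) (fun p => (zz_compare p).2)).map (·.2)] := by
  set S := PySem.List.sorted2 (zzProd n) (fun p => (zz_compare p).1) (fun p => (zz_compare p).2) with hS
  have hSnodup : S.Nodup := ((PySem.List.sorted2_perm _ _ _ _).nodup_iff).2 (nodup_zzProd n)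
  have hitems : (zigzag n).items = (PySem.List.enumerate S 0).map (fun a => (a.2, a.1)) := by
    show ((PySem.List.enumerate S 0).foldl (fun d ni => d.insert ni.2 ni.1) PySem.Dict.empty).items = _
    rw [PySem.Dict.items_foldl_insert_fresh (PySem.List.enumerate S 0) (fun ni => ni.2) (fun ni => ni.1)
        PySem.Dict.empty (fun a _ => PySem.Dict.contains_empty _)
        (by rw [PySem.List.map_snd_enumerate]; exact hSnodup)]
    simp [PySem.Dict.empty]
  unfold get_zigzag_keys
  rw [show zigzag n = (PySem.List.enumerate S 0).foldl (fun d ni => d.insert ni.2 ni.1) PySem.Dict.empty from rfl] at *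
  rw [hitems]
  rw [PySem.List.foldl_prod_mk (f := fun r (kv : (Int × Int) × Int) => r ++ [kv.1.1])
      (g := fun r (kv : (Int × Int) × Int) => r ++ [kv.1.2])]
  rw [PySem.List.foldl_append_singleton_eq_map, PySem.List.foldl_append_singleton_eq_map]
  simp only [List.map_map, List.nil_append]
  congr 1
  · show ((PySem.List.enumerate S 0).map (fun a => a.2.1)) = S.map (·.1)
    rw [show (fun a : Int × (Int × Int) => a.2.1) = (fun p : Int × Int => p.1) ∘ (fun a : Int × (Int × Int) => a.2) from rfl,
        ← List.map_map, PySem.List.map_snd_enumerate]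
  congr 1
  show ((PySem.List.enumerate S 0).map (fun a => a.2.2)) = S.map (·.2)
  rw [show (fun a : Int × (Int × Int) => a.2.2) = (fun p : Int × Int => p.2) ∘ (fun a : Int × (Int × Int) => a.2) from rfl,
      ← List.map_map, PySem.List.map_snd_enumerate]

lemma B_shape (n : Int) :
    get_zigzag_keys_alt n = [(zzDiag n).map (·.1), (zzDiag n).map (·.2)] := by
  unfold get_zigzag_keys_alt
  rw [show (fun (rc : List Int × List Int) s =>
      (if PySem.Int.mod s 2 ≠ 0 then (PySem.List.pyRange (max 0 (s - n + 1)) (min s (n - 1) + 1) 1).reverse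
       else PySem.List.pyRange (max 0 (s - n + 1)) (min s (n - 1) + 1) 1).foldl
        (fun (rc : List Int × List Int) y => (rc.1 ++ [s - y], rc.2 ++ [y])) rc)
      = fun (rc : List Int × List Int) s => (rc.1 ++ (zzYs n s).map (fun y => s - y), rc.2 ++ zzYs n s) from by
    funext rc s
    rw [show (if PySem.Int.mod s 2 ≠ 0 then (PySem.List.pyRange (max 0 (s - n + 1)) (min s (n - 1) + 1) 1).reverse
       else PySem.List.pyRange (max 0 (s - n + 1)) (min s (n - 1) + 1) 1) = zzYs n s from rfl]
    rw [PySem.List.foldl_prod_mk (f := fun r y => r ++ [s - y]) (g := fun r y => r ++ [y])]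
    rw [PySem.List.foldl_append_singleton_eq_map, PySem.List.foldl_append_singleton_eq_self]]
  rw [PySem.List.foldl_prod_mk (f := fun r s => r ++ (zzYs n s).map (fun y => s - y))
      (g := fun r s => r ++ zzYs n s)]
  rw [PySem.List.foldl_append_eq_flatMap, PySem.List.foldl_append_eq_flatMap]
  simp only [List.nil_append, zzDiag, List.map_flatMap, List.map_map]
  have h1 : ∀ s : Int, List.map ((fun x : Int × Int => x.1) ∘ fun y => (s - y, y)) (zzYs n s)
      = (zzYs n s).map (fun y => s - y) := fun s => by simp [Function.comp_def]
  have h2 : ∀ s : Int, List.map ((fun x : Int × Int => x.2) ∘ fun y => (s - y, y)) (zzYs n s)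
      = zzYs n s := fun s => by simp [Function.comp_def]
  simp only [h1, h2]

-- ===== VERDICT (by name: the statement is the Claim_ definition above) =====
theorem get_zigzag_keys_spec : Claim_equal_get_zigzag_keys := by
  intro n _
  unfold Spec_get_zigzag_keys
  rw [A_shape, B_shape, sorted_prod_eq_diag]
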